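-- pv_equiv track=rewrite | github.com/CrisRonda/devsuConcurso | 3ejercicio.py | nthCase
-- ===== SOURCE A (Python) =====
-- def nthCase(n, message):
--     contador_letra=1
--     message_edit= ""
--     if n<=0:
--         return message
--     if not message:
--         return ""
--     else:
--         for letra in message:
--             if contador_letra==n:
--                 if 'a'<=letra<='z':
--                     message_edit+=letra.upper()
--                 else:
--                     message_edit+=letra.lower()
--                 contador_letra=1
--             else:
--                 message_edit+=letra
--                 contador_letra+=1
--     return message_edit
-- ===== SOURCE B (Python) =====
-- def nthCase(n, message):
--     if n <= 0:
--         return message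
--     chars = list(message)
--     for i in range(n - 1, len(chars), n):
--         c = chars[i]
--         chars[i] = c.upper() if 'a' <= c <= 'z' else c.lower()
--     return ''.join(chars)
-- ===== Notes on version B (the rewrite author's own statement) =====
-- stated objective: faster
-- what changed: Replaces the per-character walk with a resetting counter and repeated string concatenation by a strided index loop (range(n-1, len, n)) that toggles only the nth positions in a char list joined once at the end, so untouched characters are never re-processed.
import Mathlib
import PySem

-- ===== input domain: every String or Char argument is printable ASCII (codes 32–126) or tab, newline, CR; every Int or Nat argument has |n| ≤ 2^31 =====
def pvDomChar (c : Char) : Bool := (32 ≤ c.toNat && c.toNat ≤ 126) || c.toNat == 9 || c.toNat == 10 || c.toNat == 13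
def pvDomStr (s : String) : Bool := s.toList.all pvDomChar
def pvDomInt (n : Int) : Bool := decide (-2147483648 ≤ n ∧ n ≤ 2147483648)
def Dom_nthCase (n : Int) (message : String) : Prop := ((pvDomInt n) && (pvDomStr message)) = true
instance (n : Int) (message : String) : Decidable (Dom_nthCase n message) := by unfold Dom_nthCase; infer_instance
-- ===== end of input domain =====

-- B replaces A's per-character walk with a resetting counter by a strided index loop
-- that toggles only every nth position of a char list (objective: simpler).

-- ===== PORT A =====
-- single-character letra.upper() / letra.lower()
def pvToggleUp (c : Char) : Char := PySem.Chars.upperChar c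
def pvToggleDown (c : Char) : Char := PySem.Chars.lowerChar c

def nthCase (n : Int) (message : String) : String :=
  -- contador_letra = 1; message_edit = ""
  if n ≤ 0 then message
  else if message.toList = [] then ""
  else
    let final := message.toList.foldl
      (fun (st : Int × List Char) letra =>
        if st.1 = n then
          (if 'a' ≤ letra ∧ letra ≤ 'z' then (1, st.2 ++ [pvToggleUp letra])
           else (1, st.2 ++ [pvToggleDown letra]))
        else (st.1 + 1, st.2 ++ [letra]))
      (1, [])
    String.ofList final.2

-- ===== PORT B =====
def nthCase_alt (n : Int) (message : String) : String :=
  if n ≤ 0 then message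
  else
    let chars := message.toList
    let chars := (PySem.List.pyRange (n - 1) (chars.length : Int) n).foldl
      (fun cs i =>
        let c := PySem.List.pyGetD cs i ' '
        PySem.List.pySetD cs i
          (if 'a' ≤ c ∧ c ≤ 'z' then pvToggleUp c else pvToggleDown c))
      chars
    String.ofList chars

-- ===== PRECONDITION & SPEC =====
def Spec_nthCase (n : Int) (message : String) (out : String) : Prop := out = nthCase_alt n message
instance (n : Int) (message : String) (out : String) : Decidable (Spec_nthCase n message out) := by unfold Spec_nthCase; infer_instance

-- ===== CLAIM (what is proved, stated in full; the proofs are below) =====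
def Claim_equal_nthCase : Prop := ∀ (n : Int) (message : String), Dom_nthCase n message → Spec_nthCase n message (nthCase n message)

-- ===== LEMMAS AND PROOFS =====

-- the transform both programs apply at a selected position
def pvTog (c : Char) : Char :=
  if 'a' ≤ c ∧ c ≤ 'z' then pvToggleUp c else pvToggleDown c

-- pyRange with a positive step: nil and cons unfolding
theorem pvPyRange_pos_nil (a b s : Int) (hs : 0 < s) (hab : b ≤ a) :
    PySem.List.pyRange a b s = [] := by
  rw [PySem.List.pyRange_of_pos a b hs]
  simp [show ¬ a < b by omega]

theorem pvPyRange_pos_cons (a b s : Int) (hs : 0 < s) (hab : a < b) :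
    PySem.List.pyRange a b s = a :: PySem.List.pyRange (a + s) b s := by
  rw [PySem.List.pyRange_of_pos a b hs, PySem.List.pyRange_of_pos (a+s) b hs]
  have hN : ((b - a + s - 1) / s).toNat
      = (if a + s < b then ((b - (a + s) + s - 1) / s).toNat else 0) + 1 := by
    have h1 : b - a + s - 1 = (b - a - 1) + 1 * s := by ring
    have h2 : (b - a + s - 1) / s = (b - a - 1) / s + 1 := by
      rw [h1, Int.add_mul_ediv_right _ _ (by omega : s ≠ 0)]
    by_cases hc : a + s < b
    · simp only [hc, if_true]
      have : b - (a + s) + s - 1 = b - a - 1 := by ring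
      rw [this, h2]
      have hnn : 0 ≤ (b - a - 1) / s := Int.ediv_nonneg (by omega) (by omega)
      omega
    · simp only [hc, if_false]
      have h0 : (b - a - 1) / s = 0 := Int.ediv_eq_zero_of_lt (by omega) (by omega)
      rw [h2, h0]
      rfl
  rw [if_pos hab, hN, List.range_succ_eq_map]
  simp only [List.map_cons, List.map_map]
  refine List.cons_eq_cons.mpr ⟨by simp, ?_⟩
  apply List.map_congr_left
  intro k _
  simp only [Function.comp_apply, Nat.succ_eq_add_one]
  push_cast
  ring

-- A's loop, generalized over the counter: position i is toggled when (k+i) % n = 0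
theorem pvLoopA (n : Int) (hn : 1 ≤ n) (l : List Char) :
    ∀ (k : Int) (acc : List Char), 1 ≤ k → k ≤ n →
    (l.foldl
      (fun (st : Int × List Char) letra =>
        if st.1 = n then
          (if 'a' ≤ letra ∧ letra ≤ 'z' then (1, st.2 ++ [pvToggleUp letra])
           else (1, st.2 ++ [pvToggleDown letra]))
        else (st.1 + 1, st.2 ++ [letra]))
      (k, acc)).2
    = acc ++ l.mapIdx (fun i c => if (k + (i : Int)) % n = 0 then pvTog c else c) := by
  induction l with
  | nil => intro k acc _ _; simp
  | cons c cs ih =>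
    intro k acc hk1 hk2
    rw [List.foldl_cons, List.mapIdx_cons]
    by_cases hk : k = n
    · subst hk
      have hstep : (if ((k, acc) : Int × List Char).1 = k then
          (if 'a' ≤ c ∧ c ≤ 'z' then ((1 : Int), ((k, acc) : Int × List Char).2 ++ [pvToggleUp c])
           else ((1 : Int), ((k, acc) : Int × List Char).2 ++ [pvToggleDown c]))
        else (((k, acc) : Int × List Char).1 + 1, ((k, acc) : Int × List Char).2 ++ [c]))
          = ((1 : Int), acc ++ [pvTog c]) := by
        simp only [pvTog]
        by_cases hc : 'a' ≤ c ∧ c ≤ 'z' <;> simp [hc]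
      rw [hstep, ih 1 (acc ++ [pvTog c]) le_rfl hn]
      have h0 : (k + ((0 : Nat) : Int)) % k = 0 := by simp
      rw [if_pos h0]
      have hf : List.mapIdx (fun (i : Nat) (c : Char) => if (k + ((i + 1 : Nat) : Int)) % k = 0 then pvTog c else c) cs
          = List.mapIdx (fun (i : Nat) (c : Char) => if ((1 : Int) + (i : Int)) % k = 0 then pvTog c else c) cs := by
        apply List.mapIdx_eq_mapIdx_iff.mpr
        intro i hi
        push_cast
        rw [show k + ((i : Int) + 1) = (1 + (i : Int)) + k by ring, Int.add_emod_right]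
      rw [hf]
      simp
    · have hkn : k < n := lt_of_le_of_ne hk2 hk
      have hstep : (if ((k, acc) : Int × List Char).1 = n then
          (if 'a' ≤ c ∧ c ≤ 'z' then ((1 : Int), ((k, acc) : Int × List Char).2 ++ [pvToggleUp c])
           else ((1 : Int), ((k, acc) : Int × List Char).2 ++ [pvToggleDown c]))
        else (((k, acc) : Int × List Char).1 + 1, ((k, acc) : Int × List Char).2 ++ [c]))
          = (k + 1, acc ++ [c]) := by
        simp [hk]
      rw [hstep, ih (k + 1) (acc ++ [c]) (by omega) (by omega)]
      have h0 : ¬ (k + ((0 : Nat) : Int)) % n = 0 := by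
        rw [show k + ((0 : Nat) : Int) = k by simp, Int.emod_eq_of_lt (by omega) hkn]
        omega
      rw [if_neg h0]
      have hf : List.mapIdx (fun (i : Nat) (c : Char) => if (k + ((i + 1 : Nat) : Int)) % n = 0 then pvTog c else c) cs
          = List.mapIdx (fun (i : Nat) (c : Char) => if ((k + 1) + (i : Int)) % n = 0 then pvTog c else c) cs := by
        apply List.mapIdx_eq_mapIdx_iff.mpr
        intro i hi
        push_cast
        rw [show k + ((i : Int) + 1) = (k + 1) + (i : Int) by ring]
      rw [hf]
      simp

-- B's loop: position i is toggled when a ≤ i and n divides i - a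
theorem pvLoopB (n : Int) (hn : 1 ≤ n) (L : Int) :
    ∀ (m : Nat) (a : Int) (cs : List Char), 0 ≤ a → (cs.length : Int) = L →
    (L - a).toNat = m →
    ((PySem.List.pyRange a L n).foldl
      (fun cs i =>
        let c := PySem.List.pyGetD cs i ' '
        PySem.List.pySetD cs i
          (if 'a' ≤ c ∧ c ≤ 'z' then pvToggleUp c else pvToggleDown c))
      cs)
    = cs.mapIdx (fun i c => if a ≤ (i : Int) ∧ n ∣ ((i : Int) - a) then pvTog c else c) := by
  intro m
  induction m using Nat.strong_induction_on with
  | _ m ih =>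
    intro a cs ha hL hm
    by_cases hab : a < L
    · rw [pvPyRange_pos_cons a L n (by omega) hab, List.foldl_cons]
      have hlen : a.toNat < cs.length := by omega
      have hget : PySem.List.pyGetD cs a ' ' = cs[a.toNat] :=
        PySem.List.pyGetD_eq_getElem cs ' ' ha (by omega)
      have hset : PySem.List.pySetD cs a
            (if 'a' ≤ PySem.List.pyGetD cs a ' ' ∧ PySem.List.pyGetD cs a ' ' ≤ 'z'
             then pvToggleUp (PySem.List.pyGetD cs a ' ')
             else pvToggleDown (PySem.List.pyGetD cs a ' '))
          = cs.set a.toNat (pvTog cs[a.toNat]) := by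
        rw [PySem.List.pySetD_of_nonneg cs _ ha, hget]
        rfl
      simp only []
      rw [hset]
      rw [ih (L - (a + n)).toNat (by omega) (a + n) (cs.set a.toNat (pvTog cs[a.toNat]))
          (by omega) (by rw [List.length_set]; exact hL) rfl]
      apply List.ext_getElem
      · simp
      · intro j hj1 hj2
        simp only [List.getElem_mapIdx, List.getElem_set]
        have hjlen : j < cs.length := by simpa using hj1
        by_cases hja : (j : Int) = a
        · have hjn : a.toNat = j := by omega
          have hc1 : ¬ (a + n ≤ (j : Int) ∧ n ∣ ((j : Int) - (a + n))) := by
            intro h; omega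
          have hc2 : a ≤ (j : Int) ∧ n ∣ ((j : Int) - a) := by
            constructor
            · omega
            · rw [show (j : Int) - a = 0 by omega]; exact dvd_zero n
          rw [if_pos hjn, if_neg hc1, if_pos hc2]
          simp only [hjn]
        · have hjn : ¬ a.toNat = j := by omega
          rw [if_neg hjn]
          have hcond : (a + n ≤ (j : Int) ∧ n ∣ ((j : Int) - (a + n)))
              ↔ (a ≤ (j : Int) ∧ n ∣ ((j : Int) - a)) := by
            constructor
            · rintro ⟨h1, h2⟩
              refine ⟨by omega, ?_⟩
              have : (j : Int) - a = ((j : Int) - (a + n)) + n := by ring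
              rw [this]
              exact dvd_add h2 dvd_rfl
            · rintro ⟨h1, h2⟩
              have hpos : 0 < (j : Int) - a := by omega
              have hle : n ≤ (j : Int) - a := Int.le_of_dvd hpos h2
              refine ⟨by omega, ?_⟩
              have : (j : Int) - (a + n) = ((j : Int) - a) - n := by ring
              rw [this]
              exact dvd_sub h2 dvd_rfl
          by_cases hd : a ≤ (j : Int) ∧ n ∣ ((j : Int) - a)
          · rw [if_pos hd, if_pos (hcond.mpr hd)]
          · rw [if_neg hd, if_neg (fun h => hd (hcond.mp h))]
    · rw [pvPyRange_pos_nil a L n (by omega) (by omega), List.foldl_nil]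
      apply List.ext_getElem
      · simp
      · intro j hj1 hj2
        simp only [List.getElem_mapIdx]
        have : ¬ (a ≤ (j : Int) ∧ n ∣ ((j : Int) - a)) := by
          intro h
          have : (j : Int) < L := by omega
          omega
        rw [if_neg this]

-- ===== VERDICT (by name: the statement is the Claim_ definition above) =====
theorem nthCase_spec : Claim_equal_nthCase := by
  intro n message _
  unfold Spec_nthCase nthCase nthCase_alt
  by_cases hn : n ≤ 0
  · simp [hn]
  · have hn1 : 1 ≤ n := by omega
    simp only [if_neg hn]
    by_cases hemp : message.toList = []
    · rw [if_pos hemp, hemp]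
      simp only [List.length_nil, Nat.cast_zero]
      rw [pvPyRange_pos_nil (n - 1) 0 n (by omega) (by omega)]
      rfl
    · rw [if_neg hemp]
      rw [pvLoopA n hn1 message.toList 1 [] le_rfl hn1, List.nil_append]
      rw [pvLoopB n hn1 (message.toList.length : Int) (((message.toList.length : Int) - (n - 1)).toNat)
          (n - 1) message.toList (by omega) rfl rfl]
      congr 1
      apply List.mapIdx_eq_mapIdx_iff.mpr
      intro i hi
      have hiff : ((1 : Int) + (i : Int)) % n = 0 ↔ (n - 1 ≤ (i : Int) ∧ n ∣ ((i : Int) - (n - 1))) := by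
        constructor
        · intro h
          have hdvd : n ∣ (1 + (i : Int)) := Int.dvd_of_emod_eq_zero h
          have hle : n ≤ 1 + (i : Int) := Int.le_of_dvd (by omega) hdvd
          refine ⟨by omega, ?_⟩
          have : (i : Int) - (n - 1) = (1 + (i : Int)) - n := by ring
          rw [this]
          exact dvd_sub hdvd dvd_rfl
        · rintro ⟨h1, h2⟩
          apply Int.emod_eq_zero_of_dvd
          have : (1 : Int) + (i : Int) = ((i : Int) - (n - 1)) + n := by ring
          rw [this]
          exact dvd_add h2 dvd_rfl
      by_cases hc : ((1 : Int) + (i : Int)) % n = 0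
      · rw [if_pos hc, if_pos (hiff.mp hc)]
      · rw [if_neg hc, if_neg (fun h => hc (hiff.mpr h))]
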